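-- pv_equiv track=rewrite | github.com/MrBrantCode/unitest_baseline | mut_generate/mist_train_cf/cf_98278/solution.py | find_string_with_most_vowels
-- ===== SOURCE A (Python) =====
-- def find_string_with_most_vowels(strings):
--     vowels = set('aeiouAEIOU')
--     max_vowels_count = -1
--     max_vowels_string = None
--     for string in strings:
--         if len(string) < 5 or any(char.isdigit() for char in string):
--             continue
--         vowels_count = sum(1 for char in string if char in vowels)
--         if vowels_count > max_vowels_count:
--             max_vowels_count = vowels_count
--             max_vowels_string = string
--     return max_vowels_string
-- ===== SOURCE B (Python) =====
-- def find_string_with_most_vowels(strings):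
--     vowels = set('aeiouAEIOU')
--     candidates = [s for s in strings
--                   if len(s) >= 5 and not any(c.isdigit() for c in s)]
--     if not candidates:
--         return None
--     # stable descending sort keeps the earliest string among equal vowel counts first
--     return sorted(candidates,
--                   key=lambda s: len([c for c in s if c in vowels]),
--                   reverse=True)[0]
-- ===== Notes on version B (the rewrite author's own statement) =====
-- stated objective: alternative
-- what changed: Replaces A's running-max scan with a filter of valid candidates followed by a stable descending sort on vowel count, taking the head (ties resolved by sort stability instead of a strict-greater comparison).
import Mathlib
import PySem

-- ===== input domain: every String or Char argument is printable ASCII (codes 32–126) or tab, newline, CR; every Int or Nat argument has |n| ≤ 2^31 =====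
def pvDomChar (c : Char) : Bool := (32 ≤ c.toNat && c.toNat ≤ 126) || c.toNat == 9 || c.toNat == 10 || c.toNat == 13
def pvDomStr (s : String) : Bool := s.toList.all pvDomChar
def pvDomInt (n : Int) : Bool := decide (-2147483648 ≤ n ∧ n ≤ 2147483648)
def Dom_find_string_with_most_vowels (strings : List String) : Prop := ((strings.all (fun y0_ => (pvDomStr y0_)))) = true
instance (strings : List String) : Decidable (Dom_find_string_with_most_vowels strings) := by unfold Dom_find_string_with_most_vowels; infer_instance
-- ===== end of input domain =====

-- B replaces A's running-max scan with filter + stable descending sort + take the head (alternative decomposition, same result).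

-- ===== PORT A =====
-- vowels = set('aeiouAEIOU')  (the same literal set in A and B; defined once)
def pvVowels : PySem.Set Char := PySem.Set.ofList "aeiouAEIOU".toList

def find_string_with_most_vowels (strings : List String) : Option String :=
  (strings.foldl (fun (st : Int × Option String) string =>
      if PySem.Str.len string < 5 || string.toList.any (fun c => PySem.Chars.isdigit c) then
        st
      else
        let vowels_count : Int :=
          string.toList.foldl (fun n c => if PySem.Set.contains pvVowels c then n + 1 else n) 0
        if vowels_count > st.1 then (vowels_count, some string) else st)
    (-1, none)).2

-- ===== PORT B =====
def pvIsCandidate (s : String) : Bool :=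
  decide (5 ≤ PySem.Str.len s) && !(s.toList.any (fun c => PySem.Chars.isdigit c))

def pvKeyB (s : String) : Int :=
  ((s.toList.filter (fun c => PySem.Set.contains pvVowels c)).length : Int)

def find_string_with_most_vowels_alt (strings : List String) : Option String :=
  let candidates := strings.filter pvIsCandidate
  if candidates = [] then none
  -- [0] on a list known nonempty: head?
  else (PySem.List.sorted candidates pvKeyB true).head?

-- ===== PRECONDITION & SPEC =====
def Spec_find_string_with_most_vowels (strings : List String) (out : Option String) : Prop := out = find_string_with_most_vowels_alt strings
instance (strings : List String) (out : Option String) : Decidable (Spec_find_string_with_most_vowels strings out) := by unfold Spec_find_string_with_most_vowels; infer_instance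

-- ===== CLAIM (what is proved, stated in full; the proofs are below) =====
def Claim_equal_find_string_with_most_vowels : Prop := ∀ (strings : List String), Dom_find_string_with_most_vowels strings → Spec_find_string_with_most_vowels strings (find_string_with_most_vowels strings)

-- ===== LEMMAS AND PROOFS =====

-- A's loop step, on an already-filtered element
def pvStep (st : Int × Option String) (x : String) : Int × Option String :=
  if pvKeyB x > st.1 then (pvKeyB x, some x) else st

lemma pvCount_eq (l : List Char) : ∀ n : Int,
    l.foldl (fun n c => if PySem.Set.contains pvVowels c then n + 1 else n) n
      = n + ((l.filter (fun c => PySem.Set.contains pvVowels c)).length : Int) := by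
  induction l with
  | nil => intro n; simp
  | cons c t ih =>
    intro n
    simp only [List.foldl_cons, List.filter_cons]
    by_cases h : PySem.Set.contains pvVowels c = true
    · rw [if_pos h, ih, h]
      rw [if_pos rfl]
      push_cast [List.length_cons]
      ring
    · rw [if_neg h, ih, if_neg h]

lemma pvFold_filter (strings : List String) (st : Int × Option String) :
    strings.foldl (fun (st : Int × Option String) string =>
      if PySem.Str.len string < 5 || string.toList.any (fun c => PySem.Chars.isdigit c) then
        st
      else
        let vowels_count : Int :=
          string.toList.foldl (fun n c => if PySem.Set.contains pvVowels c then n + 1 else n) 0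
        if vowels_count > st.1 then (vowels_count, some string) else st) st
    = (strings.filter pvIsCandidate).foldl pvStep st := by
  induction strings generalizing st with
  | nil => simp
  | cons s t ih =>
    rw [List.foldl_cons, List.filter_cons]
    by_cases hcand : pvIsCandidate s = true
    · have hcond : (PySem.Str.len s < 5 || s.toList.any (fun c => PySem.Chars.isdigit c)) = false := by
        simp only [pvIsCandidate, Bool.and_eq_true, Bool.not_eq_true', decide_eq_true_eq] at hcand
        simp only [Bool.or_eq_false_iff, decide_eq_false_iff_not, hcand.2, and_true]
        omega
      rw [hcond]
      simp only [Bool.false_eq_true, if_false, if_pos hcand, List.foldl_cons]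
      rw [ih]
      congr 1
      simp only [pvStep, pvCount_eq s.toList 0, pvKeyB, zero_add]
    · have hcond : (PySem.Str.len s < 5 || s.toList.any (fun c => PySem.Chars.isdigit c)) = true := by
        simp only [pvIsCandidate, Bool.and_eq_true, Bool.not_eq_true', decide_eq_true_eq, not_and] at hcand
        simp only [Bool.or_eq_true, decide_eq_true_eq]
        by_cases hd : s.toList.any (fun c => PySem.Chars.isdigit c) = true
        · exact Or.inr hd
        · left
          have := hcand
          by_contra hlen
          exact absurd (this (by omega) (by simpa using hd)) (by simp)
      rw [hcond]
      simp only [if_true, if_neg hcand]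
      exact ih st

-- head of the insertion-sort accumulator tracks A's running max
lemma pvScan_eq_head (xs : List String) : ∀ (acc : List String) (a : String),
    acc.head? = some a →
    (xs.foldl pvStep (pvKeyB a, some a)).2
      = (xs.foldl (fun acc x =>
          PySem.List.insertBy (fun a b => decide (pvKeyB b < pvKeyB a)) x acc) acc).head? := by
  induction xs with
  | nil => intro acc a hh; simp [hh]
  | cons x t ih =>
    intro acc a hh
    cases acc with
    | nil => simp at hh
    | cons a0 ta =>
      have ha : a0 = a := by simpa using hh
      subst ha
      by_cases hlt : pvKeyB a0 < pvKeyB x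
      · rw [List.foldl_cons, List.foldl_cons,
            show pvStep (pvKeyB a0, some a0) x = (pvKeyB x, some x) by simp [pvStep, hlt],
            show PySem.List.insertBy (fun a b => decide (pvKeyB b < pvKeyB a)) x (a0 :: ta)
              = x :: a0 :: ta by simp [PySem.List.insertBy, hlt]]
        exact ih (x :: a0 :: ta) x rfl
      · rw [List.foldl_cons, List.foldl_cons,
            show pvStep (pvKeyB a0, some a0) x = (pvKeyB a0, some a0) by
              simp only [pvStep, gt_iff_lt, if_neg hlt],
            show PySem.List.insertBy (fun a b => decide (pvKeyB b < pvKeyB a)) x (a0 :: ta)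
              = a0 :: PySem.List.insertBy (fun a b => decide (pvKeyB b < pvKeyB a)) x ta by
                simp [PySem.List.insertBy, hlt]]
        exact ih _ a0 rfl

-- ===== VERDICT (by name: the statement is the Claim_ definition above) =====
theorem find_string_with_most_vowels_spec : Claim_equal_find_string_with_most_vowels := by
  intro strings _
  unfold Spec_find_string_with_most_vowels find_string_with_most_vowels find_string_with_most_vowels_alt
  rw [pvFold_filter]
  cases hc : strings.filter pvIsCandidate with
  | nil => simp
  | cons f ft =>
    rw [if_neg (by simp : ¬ f :: ft = []), List.foldl_cons]
    have h0 : pvStep (-1, none) f = (pvKeyB f, some f) := by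
      have hnn : (0:Int) ≤ pvKeyB f := Int.natCast_nonneg _
      simp only [pvStep]
      rw [if_pos (by omega)]
    rw [h0, PySem.List.sorted_rev_eq_foldl_insertBy, List.foldl_cons,
        show PySem.List.insertBy (fun a b => decide (pvKeyB b < pvKeyB a)) f [] = [f] from rfl]
    exact pvScan_eq_head ft [f] f rfl
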